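-- pv_equiv track=rewrite | github.com/Hassan-Sarwat/Harvey | backend/app/workflows/general_question.py | _format_playbooks_for_context
-- ===== SOURCE A (Python) =====
-- def _format_playbooks_for_context(rows: list[dict[str, str]]) -> str:
--     sections: list[str] = []
--     current_group = ""
--     for row in rows:
--         group = f"{row.get('_source', 'BMW playbook')}: {row.get('_file', '')}"
--         if group != current_group:
--             sections.append(f"\n### {group}")
--             current_group = group
--
--         rule_id = row.get("id", "")
--         title = row.get("title", "")
--         severity = (row.get("severity") or "medium").upper()
--         lines = [f"{rule_id} - {title} [{severity}]"]
--         for key, label in [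
--             ("default", "BMW standard position"),
--             ("preferred_position", "Preferred position"),
--             ("why_it_matters", "Why it matters"),
--             ("fallback_1", "Fallback 1"),
--             ("fallback_2", "Fallback 2"),
--             ("red_line", "Red line"),
--             ("escalation_trigger", "Escalation trigger"),
--             ("legal_basis", "Legal basis noted in playbook"),
--             ("approved_fix", "Approved fix"),
--         ]:
--             value = str(row.get(key) or "").strip()
--             if value:
--                 lines.append(f"{label}: {value}")
--         sections.append("\n".join(lines))
--     return "\n\n".join(sections) if sections else "No active playbook rows were found."
-- ===== SOURCE B (Python) =====
-- _FIELDS = [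
--     ("default", "BMW standard position"),
--     ("preferred_position", "Preferred position"),
--     ("why_it_matters", "Why it matters"),
--     ("fallback_1", "Fallback 1"),
--     ("fallback_2", "Fallback 2"),
--     ("red_line", "Red line"),
--     ("escalation_trigger", "Escalation trigger"),
--     ("legal_basis", "Legal basis noted in playbook"),
--     ("approved_fix", "Approved fix"),
-- ]
--
--
-- def _row_key(row):
--     return f"{row.get('_source', 'BMW playbook')}: {row.get('_file', '')}"
--
--
-- def _format_row(row):
--     severity = (row.get("severity") or "medium").upper()
--     head = f"{row.get('id', '')} - {row.get('title', '')} [{severity}]"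
--     body = [
--         f"{label}: {value}"
--         for key, label in _FIELDS
--         for value in [str(row.get(key) or "").strip()]
--         if value
--     ]
--     return "\n".join([head] + body)
--
--
-- def _format_playbooks_for_context(rows: list[dict[str, str]]) -> str:
--     if not rows:
--         return "No active playbook rows were found."
--     # phase 1: split rows into consecutive runs sharing the same group key
--     runs: list[tuple[str, list]] = []
--     for row in rows:
--         key = _row_key(row)
--         if runs and runs[-1][0] == key:
--             runs[-1][1].append(row)
--         else:
--             runs.append((key, [row]))
--     # phase 2: render one header per run, then each member's block
--     sections: list[str] = []
--     for key, members in runs: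
--         sections.append(f"\n### {key}")
--         sections.extend(_format_row(r) for r in members)
--     return "\n\n".join(sections)
-- ===== Notes on version B (the rewrite author's own statement) =====
-- stated objective: alternative
-- what changed: Replaces A's single stateful pass (current_group variable deciding header emission per row) with a two-phase decomposition: first group rows into consecutive runs sharing a key via a run-building pass, then render one header plus member blocks per run; the per-row block is built by a comprehension helper instead of A's accumulator loop.
import Mathlib
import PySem

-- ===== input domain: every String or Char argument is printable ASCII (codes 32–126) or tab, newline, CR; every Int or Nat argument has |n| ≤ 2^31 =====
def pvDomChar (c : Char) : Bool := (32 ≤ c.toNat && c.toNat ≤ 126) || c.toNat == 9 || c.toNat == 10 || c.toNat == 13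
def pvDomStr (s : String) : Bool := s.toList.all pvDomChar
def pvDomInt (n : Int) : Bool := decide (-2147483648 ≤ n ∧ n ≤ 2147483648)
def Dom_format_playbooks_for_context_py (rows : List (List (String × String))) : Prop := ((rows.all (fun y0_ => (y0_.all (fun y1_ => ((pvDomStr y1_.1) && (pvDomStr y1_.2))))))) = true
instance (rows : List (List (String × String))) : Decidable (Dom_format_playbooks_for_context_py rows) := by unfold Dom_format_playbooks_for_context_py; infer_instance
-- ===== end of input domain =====

-- B re-decomposes A's single stateful pass into two phases (group rows into consecutive
-- runs, then render headers and blocks per run); same output, objective: alternative.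

-- the field/label table both Pythons carry literally
def pvFields : List (String × String) := [
  ("default", "BMW standard position"),
  ("preferred_position", "Preferred position"),
  ("why_it_matters", "Why it matters"),
  ("fallback_1", "Fallback 1"),
  ("fallback_2", "Fallback 2"),
  ("red_line", "Red line"),
  ("escalation_trigger", "Escalation trigger"),
  ("legal_basis", "Legal basis noted in playbook"),
  ("approved_fix", "Approved fix")]

-- f"{row.get('_source', 'BMW playbook')}: {row.get('_file', '')}" (B's _row_key; A inlines the same f-string)
def pvKey (row : List (String × String)) : String :=
  (PySem.Dict.mk row).getD "_source" "BMW playbook" ++ ": " ++ (PySem.Dict.mk row).getD "_file" ""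

-- ===== PORT A =====
-- A's per-row block: lines accumulator grown with a conditional append over the field table
def pvBlockA (row : List (String × String)) : String :=
  let rule_id := (PySem.Dict.mk row).getD "id" ""
  let title := (PySem.Dict.mk row).getD "title" ""
  -- (row.get("severity") or "medium").upper(): None and "" both fall back to "medium"
  let severity := PySem.Str.upper
    (match (PySem.Dict.mk row).get? "severity" with
     | none => "medium"
     | some s => if s = "" then "medium" else s)
  let lines : List String := [rule_id ++ " - " ++ title ++ " [" ++ severity ++ "]"]
  let lines := pvFields.foldl (fun lines kl =>
    let value := PySem.Str.strip ((PySem.Dict.mk row).getD kl.1 "")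
    if value ≠ "" then lines ++ [kl.2 ++ ": " ++ value] else lines) lines
  PySem.Str.join "\n" lines

-- A's loop body: emit a header on group change, then the row's block
def pvStepA (st : List String × String) (row : List (String × String)) : List String × String :=
  let group := pvKey row
  let st := if group ≠ st.2 then (st.1 ++ ["\n### " ++ group], group) else st
  (st.1 ++ [pvBlockA row], st.2)

def format_playbooks_for_context_py (rows : List (List (String × String))) : String :=
  let st : List String × String := rows.foldl pvStepA ([], "")
  if st.1 = [] then "No active playbook rows were found."
  else PySem.Str.join "\n\n" st.1

-- ===== PORT B =====
-- B's _format_row: head plus a comprehension (flatMap) over the field table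
def pvFormatRowB (row : List (String × String)) : String :=
  let severity := PySem.Str.upper
    (match (PySem.Dict.mk row).get? "severity" with
     | none => "medium"
     | some s => if s = "" then "medium" else s)
  let head := (PySem.Dict.mk row).getD "id" "" ++ " - " ++ (PySem.Dict.mk row).getD "title" "" ++ " [" ++ severity ++ "]"
  let body := pvFields.flatMap (fun kl =>
    let value := PySem.Str.strip ((PySem.Dict.mk row).getD kl.1 "")
    if value ≠ "" then [kl.2 ++ ": " ++ value] else [])
  PySem.Str.join "\n" (head :: body)

-- runs[-1][1].append(row) if the key matches the last run, else runs.append((key,[row]))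
def pvAddRun (runs : List (String × List (List (String × String)))) (k : String)
    (row : List (String × String)) : List (String × List (List (String × String))) :=
  match runs with
  | [] => [(k, [row])]
  | [last] => if last.1 = k then [(last.1, last.2 ++ [row])] else [last, (k, [row])]
  | r :: rest => r :: pvAddRun rest k row

def format_playbooks_for_context_py_alt (rows : List (List (String × String))) : String :=
  if rows = [] then "No active playbook rows were found."
  else
    let runs := rows.foldl (fun runs row => pvAddRun runs (pvKey row) row) []
    let sections := runs.foldl (fun acc kr =>
      acc ++ (("\n### " ++ kr.1) :: kr.2.map pvFormatRowB)) []
    PySem.Str.join "\n\n" sections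

-- ===== PRECONDITION & SPEC =====
def Spec_format_playbooks_for_context_py (rows : List (List (String × String))) (out : String) : Prop := out = format_playbooks_for_context_py_alt rows
instance (rows : List (List (String × String))) (out : String) : Decidable (Spec_format_playbooks_for_context_py rows out) := by unfold Spec_format_playbooks_for_context_py; infer_instance

-- ===== CLAIM (what is proved, stated in full; the proofs are below) =====
def Claim_equal_format_playbooks_for_context_py : Prop := ∀ (rows : List (List (String × String))), Dom_format_playbooks_for_context_py rows → Spec_format_playbooks_for_context_py rows (format_playbooks_for_context_py rows)

-- ===== LEMMAS AND PROOFS =====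

theorem pvFoldIf {α β : Type} (l : List α) (p : α → Prop) [DecidablePred p] (f : α → β)
    (acc : List β) :
    l.foldl (fun acc x => if p x then acc ++ [f x] else acc) acc
      = acc ++ l.flatMap (fun x => if p x then [f x] else []) := by
  induction l generalizing acc with
  | nil => simp
  | cons x xs ih => by_cases h : p x <;> simp [h, ih]

-- A's block equals B's block
theorem pvBlock_eq (row : List (String × String)) : pvBlockA row = pvFormatRowB row := by
  simp only [pvBlockA, pvFormatRowB]
  rw [pvFoldIf pvFields (fun kl => PySem.Str.strip ((PySem.Dict.mk row).getD kl.1 "") ≠ "")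
      (fun kl => kl.2 ++ ": " ++ PySem.Str.strip ((PySem.Dict.mk row).getD kl.1 ""))]
  rfl

-- the list of sections A emits starting from current group g
def pvOutS (rows : List (List (String × String))) (g : String) : List String :=
  match rows with
  | [] => []
  | r :: rs =>
    (if pvKey r ≠ g then ["\n### " ++ pvKey r] else []) ++ [pvBlockA r] ++ pvOutS rs (pvKey r)

-- same, with an optional previous key (B side: no previous run = none)
def pvOutO (rows : List (List (String × String))) (o : Option String) : List String :=
  match rows with
  | [] => []
  | r :: rs =>
    (if some (pvKey r) ≠ o then ["\n### " ++ pvKey r] else []) ++ [pvBlockA r] ++ pvOutO rs (some (pvKey r))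

theorem pvOutS_eq_pvOutO (rows : List (List (String × String))) (g : String) :
    pvOutS rows g = pvOutO rows (some g) := by
  induction rows generalizing g with
  | nil => rfl
  | cons r rs ih => simp [pvOutS, pvOutO, ih]

theorem pvKey_ne_empty (row : List (String × String)) : pvKey row ≠ "" := by
  unfold pvKey
  intro h
  have := congrArg String.toList h
  simp at this

theorem pvOutO_none (rows : List (List (String × String))) :
    pvOutO rows none = pvOutS rows "" := by
  cases rows with
  | nil => rfl
  | cons r rs =>
    simp [pvOutO, pvOutS, pvOutS_eq_pvOutO, pvKey_ne_empty r]

-- A's fold appends exactly pvOutS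
theorem pvFoldA (rows : List (List (String × String))) (p : List String × String) :
    (rows.foldl pvStepA p).1 = p.1 ++ pvOutS rows p.2 := by
  induction rows generalizing p with
  | nil => simp [pvOutS]
  | cons r rs ih =>
    rw [List.foldl_cons, ih]
    by_cases h : pvKey r = p.2 <;> simp [pvStepA, pvOutS, h]

def pvRender (runs : List (String × List (List (String × String)))) : List String :=
  runs.flatMap (fun kr => ("\n### " ++ kr.1) :: kr.2.map pvFormatRowB)

def pvLastKey? (runs : List (String × List (List (String × String)))) : Option String :=
  runs.getLast?.map (·.1)

theorem pvAddRun_nil (k : String) (row : List (String × String)) :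
    pvAddRun [] k row = [(k, [row])] := rfl

theorem pvAddRun_singleton (last : String × List (List (String × String))) (k : String)
    (row : List (String × String)) :
    pvAddRun [last] k row =
      if last.1 = k then [(last.1, last.2 ++ [row])] else [last, (k, [row])] := rfl

theorem pvAddRun_cons_cons (r r' : String × List (List (String × String)))
    (rest : List (String × List (List (String × String)))) (k : String)
    (row : List (String × String)) :
    pvAddRun (r :: r' :: rest) k row = r :: pvAddRun (r' :: rest) k row := rfl

theorem pvAddRun_ne_nil (runs : List (String × List (List (String × String)))) (k : String)
    (row : List (String × String)) : pvAddRun runs k row ≠ [] := by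
  match runs with
  | [] => simp [pvAddRun_nil]
  | [last] => rw [pvAddRun_singleton]; split_ifs <;> simp
  | r :: r' :: rest => rw [pvAddRun_cons_cons]; simp

theorem pvLastKey?_cons_cons (r r' : String × List (List (String × String)))
    (rest : List (String × List (List (String × String)))) :
    pvLastKey? (r :: r' :: rest) = pvLastKey? (r' :: rest) := by
  simp [pvLastKey?, List.getLast?_cons_cons]

theorem pvAddRun_lastKey (runs : List (String × List (List (String × String)))) (k : String)
    (row : List (String × String)) : pvLastKey? (pvAddRun runs k row) = some k := by
  induction runs with
  | nil => rfl
  | cons r rest ih =>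
    cases rest with
    | nil => rw [pvAddRun_singleton]; split_ifs with h <;> simp [pvLastKey?, h]
    | cons r' rest' =>
      rw [pvAddRun_cons_cons]
      obtain ⟨y, ys, hxy⟩ := List.exists_cons_of_ne_nil (pvAddRun_ne_nil (r' :: rest') k row)
      rw [hxy] at ih ⊢
      rw [pvLastKey?_cons_cons]
      exact ih

theorem pvRender_cons (r : String × List (List (String × String)))
    (rest : List (String × List (List (String × String)))) :
    pvRender (r :: rest) = (("\n### " ++ r.1) :: r.2.map pvFormatRowB) ++ pvRender rest := by
  simp [pvRender]

theorem pvAddRun_render (runs : List (String × List (List (String × String)))) (k : String)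
    (row : List (String × String)) :
    pvRender (pvAddRun runs k row) =
      pvRender runs ++ (if pvLastKey? runs = some k then [] else ["\n### " ++ k]) ++ [pvFormatRowB row] := by
  induction runs with
  | nil => simp [pvAddRun_nil, pvRender, pvLastKey?]
  | cons r rest ih =>
    cases rest with
    | nil =>
      rw [pvAddRun_singleton]
      split_ifs with h <;> simp_all [pvRender, pvLastKey?]
    | cons r' rest' =>
      rw [pvAddRun_cons_cons, pvRender_cons, pvRender_cons, ih, pvLastKey?_cons_cons]
      simp

-- B's run-building fold renders to pvOutO past the accumulated runs
theorem pvFoldB (rows : List (List (String × String)))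
    (runs : List (String × List (List (String × String)))) :
    pvRender (rows.foldl (fun runs row => pvAddRun runs (pvKey row) row) runs) =
      pvRender runs ++ pvOutO rows (pvLastKey? runs) := by
  induction rows generalizing runs with
  | nil => simp [pvOutO]
  | cons r rs ih =>
    simp only [List.foldl_cons, pvOutO]
    rw [ih, pvAddRun_render, pvAddRun_lastKey, pvBlock_eq]
    by_cases h : pvLastKey? runs = some (pvKey r) <;> simp [h, eq_comm]

theorem pvOutS_ne_nil (r : List (String × String)) (rs : List (List (String × String))) :
    pvOutS (r :: rs) "" ≠ [] := by
  simp [pvOutS, pvKey_ne_empty r]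

-- ===== VERDICT (by name: the statement is the Claim_ definition above) =====
theorem format_playbooks_for_context_py_spec : Claim_equal_format_playbooks_for_context_py := by
  intro rows _
  unfold Spec_format_playbooks_for_context_py
  simp only [format_playbooks_for_context_py, format_playbooks_for_context_py_alt]
  rw [pvFoldA rows ([], "")]
  cases rows with
  | nil => simp [pvOutS]
  | cons r rs =>
    rw [if_neg (by simpa using pvOutS_ne_nil r rs), if_neg (by simp)]
    have hB : List.foldl (fun acc kr => acc ++ (("\n### " ++ kr.1) :: kr.2.map pvFormatRowB)) []
        ((r :: rs).foldl (fun runs row => pvAddRun runs (pvKey row) row) []) =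
        pvRender ((r :: rs).foldl (fun runs row => pvAddRun runs (pvKey row) row) []) := by
      rw [PySem.List.foldl_append_eq_flatMap]; rfl
    rw [hB, pvFoldB (r :: rs) []]
    simp [pvRender, pvLastKey?, pvOutO_none]
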